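-- pv_equiv track=rewrite | github.com/MrBrantCode/unitest_baseline | mut_generate/mist_train_taco/taco_8878/solution.py | count_bouncing_ball_pairs
-- ===== SOURCE A (Python) =====
-- def count_bouncing_ball_pairs(N, F, heights):
--     count = 0
--     height_counts = {}
--
--     # Reduce each height to its base form by dividing by F until it's no longer divisible
--     base_heights = []
--     for height in heights:
--         base_height = height
--         while base_height % F == 0:
--             base_height //= F
--         base_heights.append(base_height)
--         if base_height not in height_counts:
--             height_counts[base_height] = 0
--         height_counts[base_height] += 1
--
--     # Calculate the number of valid pairs
--     for base_height in height_counts: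
--         count_of_height = height_counts[base_height]
--         count += count_of_height * (count_of_height - 1) // 2
--
--     return count
-- ===== SOURCE B (Python) =====
-- def count_bouncing_ball_pairs(N, F, heights):
--     # One pass: count pairs on the fly instead of building a frequency
--     # table and summing c*(c-1)//2 in a second loop.
--     count = 0
--     seen = {}
--     for height in heights:
--         base = height
--         while base % F == 0:
--             base //= F
--         prev = seen.get(base, 0)
--         count += prev
--         seen[base] = prev + 1
--     return count
-- ===== Notes on version B (the rewrite author's own statement) =====
-- stated objective: simpler
-- what changed: Instead of building a full frequency dict plus a base_heights list and then summing count*(count-1)//2 in a second loop over the dict, B accumulates the pair count on the fly (count += times this base was seen before), eliminating the second pass and the list.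
import Mathlib
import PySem

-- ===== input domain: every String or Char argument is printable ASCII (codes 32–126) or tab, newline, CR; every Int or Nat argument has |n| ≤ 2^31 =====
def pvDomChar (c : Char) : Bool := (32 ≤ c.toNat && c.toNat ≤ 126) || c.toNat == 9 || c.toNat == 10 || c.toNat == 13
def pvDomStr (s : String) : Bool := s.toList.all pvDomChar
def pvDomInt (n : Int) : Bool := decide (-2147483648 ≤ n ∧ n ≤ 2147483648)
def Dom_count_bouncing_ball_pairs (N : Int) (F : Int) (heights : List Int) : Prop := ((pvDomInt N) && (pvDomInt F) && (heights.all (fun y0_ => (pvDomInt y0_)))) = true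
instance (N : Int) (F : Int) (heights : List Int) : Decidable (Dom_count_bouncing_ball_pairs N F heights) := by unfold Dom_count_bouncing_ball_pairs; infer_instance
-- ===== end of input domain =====

-- B replaces A's two passes (frequency dict built first, then a second loop
-- summing c*(c-1)//2) by a single pass that accumulates the pair count on the
-- fly; return values proved equal on Pre_.

-- ===== PORT A =====
-- the `while base % F == 0: base //= F` loop of both Pythons; the extra guard
-- conditions (2 ≤ |F|, b ≠ 0) only make the recursion total — on inputs
-- violating them the Python loop raises or does not terminate (excluded by Pre_)
def reduceBase (F : Int) (b : Int) : Int :=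
  if h : PySem.Int.mod b F = 0 ∧ 2 ≤ F.natAbs ∧ b ≠ 0 then
    reduceBase F (PySem.Int.floordiv b F)
  else b
termination_by b.natAbs
decreasing_by
  obtain ⟨hmod, hF, hb⟩ := h
  have hq : PySem.Int.floordiv b F * F = b := by
    have := PySem.Int.floordiv_mul_add_mod b F
    omega
  have habs : (PySem.Int.floordiv b F).natAbs * F.natAbs = b.natAbs := by
    rw [← Int.natAbs_mul, hq]
  have hq0 : (PySem.Int.floordiv b F).natAbs ≠ 0 := by
    intro h0
    rw [h0, Nat.zero_mul] at habs
    exact hb (Int.natAbs_eq_zero.mp habs.symm)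
  have h2 : (PySem.Int.floordiv b F).natAbs * 2 ≤ (PySem.Int.floordiv b F).natAbs * F.natAbs :=
    Nat.mul_le_mul_left _ hF
  omega

def count_bouncing_ball_pairs (N : Int) (F : Int) (heights : List Int) : Int :=
  let st := heights.foldl
    (fun (st : List Int × PySem.Dict Int Int) height =>
      let base_height := reduceBase F height
      let hc := if st.2.contains base_height then st.2 else st.2.insert base_height 0
      (st.1 ++ [base_height], hc.insert base_height (hc.getD base_height 0 + 1)))
    ([], PySem.Dict.empty)
  st.2.keys.foldl
    (fun count base_height =>
      let count_of_height := st.2.getD base_height 0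
      count + PySem.Int.floordiv (count_of_height * (count_of_height - 1)) 2)
    0

-- ===== PORT B =====
def count_bouncing_ball_pairs_alt (N : Int) (F : Int) (heights : List Int) : Int :=
  (heights.foldl
    (fun (st : Int × PySem.Dict Int Int) height =>
      let base := reduceBase F height
      let prev := st.2.getD base 0
      (st.1 + prev, st.2.insert base (prev + 1)))
    (0, PySem.Dict.empty)).1

-- ===== PRECONDITION & SPEC =====
-- Pre_ excludes exactly the inputs where Python A does not return: with a
-- nonempty heights list, F ∈ {-1, 0, 1} (ZeroDivisionError for F = 0, an
-- infinite reduction loop for F = ±1) or a height 0 (infinite loop 0 //= F).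
def Pre_count_bouncing_ball_pairs (N : Int) (F : Int) (heights : List Int) : Prop :=
  heights = [] ∨ (2 ≤ F.natAbs ∧ ¬ (0 ∈ heights))
instance (N : Int) (F : Int) (heights : List Int) : Decidable (Pre_count_bouncing_ball_pairs N F heights) := by unfold Pre_count_bouncing_ball_pairs; infer_instance

def pvWitness_count_bouncing_ball_pairs : Int × Int × List Int := (5, 2, [6, 24, 10, 3])

def Spec_count_bouncing_ball_pairs (N : Int) (F : Int) (heights : List Int) (out : Int) : Prop := out = count_bouncing_ball_pairs_alt N F heights
instance (N : Int) (F : Int) (heights : List Int) (out : Int) : Decidable (Spec_count_bouncing_ball_pairs N F heights out) := by unfold Spec_count_bouncing_ball_pairs; infer_instance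

-- ===== CLAIM (what is proved, stated in full; the proofs are below) =====
def Claim_equal_count_bouncing_ball_pairs : Prop := ∀ (N : Int) (F : Int) (heights : List Int), Dom_count_bouncing_ball_pairs N F heights → Pre_count_bouncing_ball_pairs N F heights → Spec_count_bouncing_ball_pairs N F heights (count_bouncing_ball_pairs N F heights)

-- ===== LEMMAS AND PROOFS =====

-- c choose 2 as A's second loop computes it
def pvC2 (c : Int) : Int := PySem.Int.floordiv (c * (c - 1)) 2

-- the value A's second loop extracts from a dict, as a function of its items
def pvSl (l : List (Int × Int)) : Int := (l.map (fun p => pvC2 p.2)).sum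

lemma pvC2_succ (w : Int) : pvC2 (w + 1) = pvC2 w + w := by
  unfold pvC2
  rw [PySem.Int.floordiv_eq_ediv_of_pos (by omega), PySem.Int.floordiv_eq_ediv_of_pos (by omega)]
  obtain ⟨k, hk⟩ := Int.even_mul_succ_self (w - 1)
  have h1 : w * (w - 1) = 2 * k := by linarith
  have h2 : (w + 1) * (w + 1 - 1) = 2 * (k + w) := by linarith
  rw [h1, h2, Int.mul_ediv_cancel_left _ (by omega), Int.mul_ediv_cancel_left _ (by omega)]

lemma pvSl_replace (l : List (Int × Int)) (b w : Int)
    (hnd : (l.map Prod.fst).Nodup) (hmem : (b, w) ∈ l) :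
    pvSl (l.map (fun p => if p.1 == b then (b, w + 1) else p)) = pvSl l + w := by
  induction l with
  | nil => simp at hmem
  | cons p t ih =>
    simp only [List.map_cons, List.nodup_cons] at hnd
    rcases List.mem_cons.mp hmem with heq | hmem'
    · subst heq
      simp only [List.map_cons]
      have htid : t.map (fun p => if p.1 == b then (b, w + 1) else p) = t := by
        refine (List.map_congr_left ?_).trans (List.map_id t)
        intro q hq
        have hq1 : q.1 ≠ b := by
          intro h; exact hnd.1 (List.mem_map.mpr ⟨q, hq, h⟩)
        simp [hq1]
      rw [htid]
      simp [pvSl, pvC2_succ]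
      ring
    · have hpb : p.1 ≠ b := by
        intro h
        exact hnd.1 (h ▸ (List.mem_map_of_mem hmem' : (b, w).1 ∈ t.map Prod.fst))
      have hfb : (p.1 == b) = false := by simpa using hpb
      simp only [pvSl, List.map_cons, List.sum_cons, hfb, Bool.false_eq_true, if_false] at ih ⊢
      rw [ih hnd.2 hmem']
      ring

-- a counting insert raises A's pair-sum over the items by the old count
lemma pvSl_insert (d : PySem.Dict Int Int) (b : Int) (hnd : d.keys.Nodup) :
    pvSl (d.insert b (d.getD b 0 + 1)).items = pvSl d.items + d.getD b 0 := by
  by_cases hc : d.contains b = true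
  · obtain ⟨v, hv⟩ : ∃ v, d.get? b = some v := by
      cases h : d.get? b with
      | none => rw [PySem.Dict.contains_eq_isSome_get?, h] at hc; simp at hc
      | some v => exact ⟨v, rfl⟩
    have hgd : d.getD b 0 = v := PySem.Dict.getD_of_get?_eq_some d 0 hv
    have hmem : (b, v) ∈ d.items := PySem.Dict.mem_items_of_get?_eq_some d hv
    rw [PySem.Dict.items_insert_of_contains d _ hc, hgd]
    exact pvSl_replace d.items b v hnd hmem
  · have hc' : d.contains b = false := by simpa using hc
    rw [PySem.Dict.items_insert_of_not_contains d _ hc', PySem.Dict.getD_of_not_contains d 0 hc']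
    simp [pvSl]
    decide

-- B's loop accumulates exactly the pair-sum of the counting dict it builds
lemma pvB_loop (bs : List Int) :
    ∀ (d : PySem.Dict Int Int) (c : Int), d.keys.Nodup →
    (bs.foldl (fun (st : Int × PySem.Dict Int Int) b =>
        (st.1 + st.2.getD b 0, st.2.insert b (st.2.getD b 0 + 1))) (c, d)).1
      = c + pvSl ((bs.foldl (fun d b => d.insert b (d.getD b 0 + 1)) d).items)
          - pvSl d.items := by
  induction bs with
  | nil => intro d c _; simp
  | cons b t ih =>
    intro d c hnd
    simp only [List.foldl_cons]
    rw [ih _ _ (PySem.Dict.nodup_keys_insert d b _ hnd), pvSl_insert d b hnd]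
    ring

-- A's dict update (membership test then +=) is a single counting insert
lemma pvAstep_eq (d : PySem.Dict Int Int) (b : Int) :
    (if d.contains b then d else d.insert b 0).insert b
      ((if d.contains b then d else d.insert b 0).getD b 0 + 1)
      = d.insert b (d.getD b 0 + 1) := by
  by_cases hc : d.contains b = true
  · simp [hc]
  · have hc' : d.contains b = false := by simpa using hc
    simp [hc', PySem.Dict.getD_insert_self, PySem.Dict.insert_insert_self,
      PySem.Dict.getD_of_not_contains d 0 hc']

-- the dict A's first loop builds, ignoring the base_heights component
lemma pvA_dict (F : Int) (hs : List Int) :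
    ∀ (bl : List Int) (d : PySem.Dict Int Int),
    (hs.foldl
      (fun (st : List Int × PySem.Dict Int Int) height =>
        let base_height := reduceBase F height
        let hc := if st.2.contains base_height then st.2 else st.2.insert base_height 0
        (st.1 ++ [base_height], hc.insert base_height (hc.getD base_height 0 + 1)))
      (bl, d)).2
      = hs.foldl (fun d h => d.insert (reduceBase F h) (d.getD (reduceBase F h) 0 + 1)) d := by
  induction hs with
  | nil => intro bl d; rfl
  | cons h t ih =>
    intro bl d
    simp only [List.foldl_cons]
    rw [pvAstep_eq d (reduceBase F h)]
    exact ih _ _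

-- A's second loop over the keys is the pair-sum of the items
lemma pvKeys_fold (d : PySem.Dict Int Int) (hnd : d.keys.Nodup) :
    d.keys.foldl (fun c k =>
      c + PySem.Int.floordiv (d.getD k 0 * (d.getD k 0 - 1)) 2) 0 = pvSl d.items := by
  rw [PySem.List.foldl_add d.keys
      (fun k => PySem.Int.floordiv (d.getD k 0 * (d.getD k 0 - 1)) 2) 0,
    PySem.Dict.items_eq_map_keys d hnd 0]
  simp [pvSl, pvC2, Function.comp_def]

-- ===== VERDICT (by name: the statement is the Claim_ definition above) =====
theorem count_bouncing_ball_pairs_spec : Claim_equal_count_bouncing_ball_pairs := by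
  intro N F heights _ _
  unfold Spec_count_bouncing_ball_pairs count_bouncing_ball_pairs count_bouncing_ball_pairs_alt
  simp only []
  rw [pvA_dict F heights [] PySem.Dict.empty]
  have e1 : heights.foldl
      (fun (d : PySem.Dict Int Int) h => d.insert (reduceBase F h) (d.getD (reduceBase F h) 0 + 1))
      PySem.Dict.empty
      = (heights.map (reduceBase F)).foldl (fun d b => d.insert b (d.getD b 0 + 1)) PySem.Dict.empty := by
    rw [List.foldl_map]
  have e2 : heights.foldl
      (fun (st : Int × PySem.Dict Int Int) h =>
        (st.1 + st.2.getD (reduceBase F h) 0,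
          st.2.insert (reduceBase F h) (st.2.getD (reduceBase F h) 0 + 1)))
      (0, PySem.Dict.empty)
      = (heights.map (reduceBase F)).foldl
          (fun st b => (st.1 + st.2.getD b 0, st.2.insert b (st.2.getD b 0 + 1)))
          (0, PySem.Dict.empty) := by
    rw [List.foldl_map]
  rw [e1, e2, PySem.Dict.foldl_insert_getD_add_one_eq_counter]
  have hB := pvB_loop (heights.map (reduceBase F)) PySem.Dict.empty 0 PySem.Dict.nodup_keys_empty
  rw [PySem.Dict.foldl_insert_getD_add_one_eq_counter] at hB
  rw [hB]
  rw [pvKeys_fold _ (PySem.Dict.nodup_keys_counter _)]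
  simp [pvSl, PySem.Dict.empty]
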